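-- pv_equiv track=rewrite | github.com/981377660LMT/algorithm-study | 21_位运算/按位异或/3215. 用偶数异或设置位计数三元组 II.py | tripletCount
-- ===== SOURCE A (Python) =====
-- from itertools import product
-- from typing import List
--
-- def tripletCount(a: List[int], b: List[int], c: List[int]) -> int:
--     def cal(nums: List[int]) -> List[int]:
--         res = [0, 0]
--         for num in nums:
--             res[num.bit_count() & 1] += 1
--         return res
--
--     counter1, counter2, counter3 = cal(a), cal(b), cal(c)
--     res = 0
--     for i, j, k in product(range(2), repeat=3):
--         if not (i + j + k) & 1:
--             res += counter1[i] * counter2[j] * counter3[k]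
--     return res
-- ===== SOURCE B (Python) =====
-- def tripletCount(a, b, c):
--     def sgn(nums):
--         d = 0
--         for num in nums:
--             d += 1 if num.bit_count() % 2 == 0 else -1
--         return d
--     return (len(a) * len(b) * len(c) + sgn(a) * sgn(b) * sgn(c)) // 2
-- ===== Notes on version B (the rewrite author's own statement) =====
-- stated objective: simpler
-- what changed: Replaces the 8-way enumeration of parity combinations (and the two-bucket counters) by a signed sum per list and the closed form (T_a*T_b*T_c + D_a*D_b*D_c)//2.
import Mathlib
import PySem

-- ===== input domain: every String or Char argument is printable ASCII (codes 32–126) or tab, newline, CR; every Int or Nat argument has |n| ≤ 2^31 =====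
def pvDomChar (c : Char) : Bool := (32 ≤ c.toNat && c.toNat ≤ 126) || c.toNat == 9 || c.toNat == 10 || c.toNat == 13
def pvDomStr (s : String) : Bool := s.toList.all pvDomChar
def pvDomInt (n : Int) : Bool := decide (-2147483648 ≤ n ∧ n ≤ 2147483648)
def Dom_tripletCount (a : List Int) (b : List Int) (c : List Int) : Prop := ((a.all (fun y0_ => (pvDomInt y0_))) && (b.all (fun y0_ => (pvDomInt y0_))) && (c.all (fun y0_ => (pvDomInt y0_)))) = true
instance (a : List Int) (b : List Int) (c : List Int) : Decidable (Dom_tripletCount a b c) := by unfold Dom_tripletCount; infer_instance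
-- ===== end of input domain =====

-- B replaces the 8-way parity-combination enumeration by a signed sum per list and
-- the closed form (T_a*T_b*T_c + D_a*D_b*D_c) // 2: simpler, same cost.

-- ===== PORT A =====
-- cal: res = [0,0]; res[num.bit_count() & 1] += 1  (the 2-element list is the pair (res[0], res[1]))
def pyCal (nums : List Int) : Int × Int :=
  nums.foldl
    (fun res num =>
      if PySem.Int.bitCount num &&& 1 == 0 then (res.1 + 1, res.2) else (res.1, res.2 + 1))
    (0, 0)

-- counter[i] for i in {0,1}
def pyIdx (p : Int × Int) (i : Int) : Int := if i == 0 then p.1 else p.2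

def tripletCount (a : List Int) (b : List Int) (c : List Int) : Int :=
  let counter1 := pyCal a
  let counter2 := pyCal b
  let counter3 := pyCal c
  -- product(range(2), repeat=3) in order, with the `not (i+j+k) & 1` filter
  ([(0,0,0),(0,0,1),(0,1,0),(0,1,1),(1,0,0),(1,0,1),(1,1,0),(1,1,1)] : List (Int × Int × Int)).foldl
    (fun res ijk =>
      if PySem.Int.band (ijk.1 + ijk.2.1 + ijk.2.2) 1 == 0 then
        res + pyIdx counter1 ijk.1 * pyIdx counter2 ijk.2.1 * pyIdx counter3 ijk.2.2
      else res)
    0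

-- ===== PORT B =====
def sgnSum (nums : List Int) : Int :=
  nums.foldl (fun d num => d + (if PySem.Int.bitCount num % 2 == 0 then 1 else -1)) 0

def tripletCount_alt (a : List Int) (b : List Int) (c : List Int) : Int :=
  PySem.Int.floordiv
    ((a.length : Int) * (b.length : Int) * (c.length : Int) + sgnSum a * sgnSum b * sgnSum c) 2

-- ===== PRECONDITION & SPEC =====
def Spec_tripletCount (a : List Int) (b : List Int) (c : List Int) (out : Int) : Prop := out = tripletCount_alt a b c
instance (a : List Int) (b : List Int) (c : List Int) (out : Int) : Decidable (Spec_tripletCount a b c out) := by unfold Spec_tripletCount; infer_instance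

-- ===== CLAIM (what is proved, stated in full; the proofs are below) =====
def Claim_equal_tripletCount : Prop := ∀ (a : List Int) (b : List Int) (c : List Int), Dom_tripletCount a b c → Spec_tripletCount a b c (tripletCount a b c)

-- ===== LEMMAS AND PROOFS =====

-- cal's fold started at (e,o) is the fold from (0,0) shifted by (e,o)
theorem pyCal_shift (nums : List Int) (e o : Int) :
    nums.foldl
      (fun res num =>
        if PySem.Int.bitCount num &&& 1 == 0 then (res.1 + 1, res.2) else (res.1, res.2 + 1))
      (e, o) = (e + (pyCal nums).1, o + (pyCal nums).2) := by
  induction nums generalizing e o with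
  | nil => simp [pyCal]
  | cons x xs ih =>
    simp only [pyCal, List.foldl]
    split <;> rw [ih, ih] <;> simp [Prod.ext_iff] <;> ring

-- sgnSum's fold started at d is d + sgnSum
theorem sgnSum_shift (nums : List Int) (d : Int) :
    nums.foldl (fun d num => d + (if PySem.Int.bitCount num % 2 == 0 then 1 else -1)) d
      = d + sgnSum nums := by
  induction nums generalizing d with
  | nil => simp [sgnSum]
  | cons x xs ih =>
    simp only [sgnSum, List.foldl]
    rw [ih, ih]; ring

-- the two bucket counts sum to the length …
theorem pyCal_sum (nums : List Int) :
    (pyCal nums).1 + (pyCal nums).2 = (nums.length : Int) := by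
  induction nums with
  | nil => simp [pyCal]
  | cons x xs ih =>
    simp only [pyCal, List.foldl, List.length_cons]
    split <;> rw [pyCal_shift] <;> push_cast <;> omega

-- … and differ by the signed sum
theorem pyCal_sub (nums : List Int) :
    (pyCal nums).1 - (pyCal nums).2 = sgnSum nums := by
  induction nums with
  | nil => simp [pyCal, sgnSum]
  | cons x xs ih =>
    have hc : (PySem.Int.bitCount x &&& 1 == 0) = (PySem.Int.bitCount x % 2 == 0) := by
      rw [Nat.and_one_is_mod]
    simp only [pyCal, sgnSum, List.foldl]
    rw [hc]
    split <;> rw [pyCal_shift, sgnSum_shift] <;> omega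

-- ===== VERDICT (by name: the statement is the Claim_ definition above) =====
theorem tripletCount_spec : Claim_equal_tripletCount := by
  intro a b c _
  show tripletCount a b c = tripletCount_alt a b c
  unfold tripletCount tripletCount_alt
  simp only [List.foldl, pyIdx]
  norm_num [PySem.Int.band]
  rw [← pyCal_sum a, ← pyCal_sum b, ← pyCal_sum c,
      ← pyCal_sub a, ← pyCal_sub b, ← pyCal_sub c]
  have h2 : ((pyCal a).1 + (pyCal a).2) * ((pyCal b).1 + (pyCal b).2) * ((pyCal c).1 + (pyCal c).2)
       + ((pyCal a).1 - (pyCal a).2) * ((pyCal b).1 - (pyCal b).2) * ((pyCal c).1 - (pyCal c).2)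
       = 2 * ((pyCal a).1 * (pyCal b).1 * (pyCal c).1
            + (pyCal a).1 * (pyCal b).2 * (pyCal c).2
            + (pyCal a).2 * (pyCal b).1 * (pyCal c).2
            + (pyCal a).2 * (pyCal b).2 * (pyCal c).1) := by ring
  rw [h2, Int.mul_ediv_cancel_left _ (by norm_num : (2:Int) ≠ 0)]
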